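-- pv_equiv track=rewrite | github.com/limys0713/Data-Science-Python | Lab 0/hw0_p2.py | top_2_actors_playing_most_genres_movies
-- ===== SOURCE A (Python) =====
-- def top_2_actors_playing_most_genres_movies(data):
--     actor_genres = {} # Set
--
--     for movie in data:
--         genres = set(movie["Genre"].split('|'))
--         actors = movie["Actors"].split('|')
--
--         # Save movie genre in each actors if this genre hasn been recorded in those actors respectively
--         for actor in actors:
--             actor = actor.strip() # Remove the leading spaces
--             if actor not in actor_genres:
--                 actor_genres[actor] = set()
--             actor_genres[actor].update(genres)  # Update the set with new genres that the actor participated in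
--
--     genres_count = {actor: len(genres) for actor, genres in actor_genres.items()}
--     top_2_amount_genres_movies = sorted(set(genres_count.values()), reverse = True)[ : 2]
--     answer = [(actor, genre_count) for actor, genre_count in genres_count.items() if genre_count in top_2_amount_genres_movies]
--     sort_answer = sorted(answer, key = lambda x: x[1], reverse = True)
--
--     return sort_answer
-- ===== SOURCE B (Python) =====
-- def top_2_actors_playing_most_genres_movies(data):
--     # Count distinct genres per actor by deduplicating (actor, genre) pairs in one
--     # global set, instead of keeping a genre set per actor; then pick the top two
--     # counts by a max / second-max scan instead of sorting.
--     counts = {}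
--     seen_pairs = set()
--     for movie in data:
--         genres = movie["Genre"].split('|')
--         for actor in movie["Actors"].split('|'):
--             actor = actor.strip()
--             counts.setdefault(actor, 0)
--             for g in genres:
--                 if (actor, g) not in seen_pairs:
--                     seen_pairs.add((actor, g))
--                     counts[actor] += 1
--     if not counts:
--         return []
--     m1 = max(counts.values())
--     lows = [c for c in counts.values() if c < m1]
--     out = [(a, c) for a, c in counts.items() if c == m1]
--     if lows:
--         m2 = max(lows)
--         out += [(a, c) for a, c in counts.items() if c == m2]
--     return out
-- ===== Notes on version B (the rewrite author's own statement) =====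
-- stated objective: alternative
-- what changed: B never builds a per-actor genre set: it counts each actor's distinct genres incrementally by deduplicating (actor, genre) pairs in one global set while folding the input, and replaces A's sort-distinct-counts + filter + stable re-sort by a max / second-max scan over the count values with two filter passes.
import Mathlib
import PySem

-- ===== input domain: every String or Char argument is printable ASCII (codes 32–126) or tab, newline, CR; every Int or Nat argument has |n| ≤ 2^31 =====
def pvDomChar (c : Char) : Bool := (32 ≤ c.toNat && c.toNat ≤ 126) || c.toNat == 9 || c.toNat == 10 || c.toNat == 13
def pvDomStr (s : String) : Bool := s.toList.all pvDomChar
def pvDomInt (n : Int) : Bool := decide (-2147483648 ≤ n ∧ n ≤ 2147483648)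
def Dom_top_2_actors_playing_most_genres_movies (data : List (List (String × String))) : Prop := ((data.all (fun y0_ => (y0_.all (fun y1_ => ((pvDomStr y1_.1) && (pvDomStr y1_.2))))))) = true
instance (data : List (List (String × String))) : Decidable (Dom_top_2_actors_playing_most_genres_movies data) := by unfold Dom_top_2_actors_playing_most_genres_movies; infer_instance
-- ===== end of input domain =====

-- B counts each actor's distinct genres by deduplicating (actor, genre) pairs in one global
-- set while folding the input (no per-actor genre sets), and picks the top two counts by a
-- max / second-max scan with two filter passes instead of sort-distinct-counts + filter +
-- stable re-sort (objective: alternative algorithm/data structure).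

-- movie["k"]: first-match lookup; total form, used only under Pre_ (key present)
def pvLookup (m : List (String × String)) (k : String) : String :=
  ((m.find? (fun p => p.1 == k)).map (fun p => p.2)).getD ""

-- s.split('|') (sep nonempty, so split? always returns a value)
def pvSplitBar (s : String) : List String :=
  (PySem.Str.split? s "|").getD []

-- ===== PORT A =====
def top_2_actors_playing_most_genres_movies (data : List (List (String × String))) : List (String × Int) :=
  let actor_genres : PySem.Dict String (PySem.Set String) :=
    data.foldl (fun ag movie =>
      let genres : PySem.Set String := PySem.Set.ofList (pvSplitBar (pvLookup movie "Genre"))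
      let actors := pvSplitBar (pvLookup movie "Actors")
      actors.foldl (fun ag actor0 =>
        let actor := PySem.Str.strip actor0
        let ag1 := if ag.contains actor then ag else ag.insert actor PySem.Set.empty
        ag1.modify actor PySem.Set.empty (fun s => PySem.Set.update s genres)) ag)
      PySem.Dict.empty
  -- the dict comprehension {actor: len(genres)} is ported as its items list (it is only iterated below)
  let genres_count : List (String × Int) :=
    actor_genres.items.map (fun p => (p.1, PySem.Set.len p.2))
  let top_2 : List Int :=
    PySem.List.slice (PySem.List.sorted (PySem.Set.ofList (genres_count.map (fun p => p.2))) (fun x => x) true) none (some 2)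
  let answer := genres_count.filter (fun p => top_2.contains p.2)
  PySem.List.sorted answer (fun p => p.2) true

-- ===== PORT B =====
def top_2_actors_playing_most_genres_movies_alt (data : List (List (String × String))) : List (String × Int) :=
  let st : PySem.Dict String Int × PySem.Set (String × String) :=
    data.foldl (fun st movie =>
      let genres := pvSplitBar (pvLookup movie "Genre")
      (pvSplitBar (pvLookup movie "Actors")).foldl (fun st actor0 =>
        let actor := PySem.Str.strip actor0
        genres.foldl (fun st g =>
          if st.2.contains (actor, g) then st
          else (st.1.modify actor 0 (· + 1), st.2.add (actor, g)))
          (st.1.setdefault actor 0, st.2)) st)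
      (PySem.Dict.empty, PySem.Set.empty)
  let counts := st.1
  if counts.items.isEmpty then []
  else
    let m1 : Int := (PySem.List.max? counts.values (fun x => x)).getD 0
    let lows := counts.values.filter (fun c => c < m1)
    let out := counts.items.filter (fun p => p.2 == m1)
    if lows.isEmpty then out
    else out ++ counts.items.filter (fun p => p.2 == (PySem.List.max? lows (fun x => x)).getD 0)

-- ===== PRECONDITION & SPEC =====
-- Pre_ excludes exactly the inputs where A raises KeyError: a movie without a "Genre" or "Actors" key.
def Pre_top_2_actors_playing_most_genres_movies (data : List (List (String × String))) : Prop :=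
  ∀ m ∈ data, "Genre" ∈ m.map Prod.fst ∧ "Actors" ∈ m.map Prod.fst
instance (data : List (List (String × String))) : Decidable (Pre_top_2_actors_playing_most_genres_movies data) := by unfold Pre_top_2_actors_playing_most_genres_movies; infer_instance

def pvWitness_top_2_actors_playing_most_genres_movies : (List (List (String × String))) :=
  [[("Genre", "a|b"), ("Actors", "x | y")], [("Genre", "b|c"), ("Actors", "x")]]

def Spec_top_2_actors_playing_most_genres_movies (data : List (List (String × String))) (out : List (String × Int)) : Prop := out = top_2_actors_playing_most_genres_movies_alt data
instance (data : List (List (String × String))) (out : List (String × Int)) : Decidable (Spec_top_2_actors_playing_most_genres_movies data out) := by unfold Spec_top_2_actors_playing_most_genres_movies; infer_instance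

-- ===== CLAIM (what is proved, stated in full; the proofs are below) =====
def Claim_equal_top_2_actors_playing_most_genres_movies : Prop := ∀ (data : List (List (String × String))), Dom_top_2_actors_playing_most_genres_movies data → Pre_top_2_actors_playing_most_genres_movies data → Spec_top_2_actors_playing_most_genres_movies data (top_2_actors_playing_most_genres_movies data)

-- ===== LEMMAS AND PROOFS =====

-- A's per-actor update (maybe-insert-empty, then update in place) equals a single insert of the union.
lemma step_eq (ag : PySem.Dict String (PySem.Set String)) (genres : PySem.Set String) (actor : String) :
    (if ag.contains actor then ag else ag.insert actor PySem.Set.empty).modify actor PySem.Set.empty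
        (fun s => PySem.Set.update s genres)
      = ag.insert actor (PySem.Set.union (ag.getD actor PySem.Set.empty) genres) := by
  by_cases h : ag.contains actor
  · simp only [h, if_true, PySem.Dict.modify, PySem.Set.union]
  · simp only [h, Bool.false_eq_true, if_false, PySem.Dict.modify,
      PySem.Dict.getD_insert_self, PySem.Dict.insert_insert_self, PySem.Set.union]
    have h0 : ag.get? actor = none := (PySem.Dict.get?_eq_none_iff_contains ag actor).mpr (by simpa using h)
    simp [PySem.Dict.getD, h0, PySem.Set.empty]

-- the two shapes of A's aggregation loop produce the same dict
lemma agg_eq (data : List (List (String × String))) :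
    data.foldl (fun ag movie =>
      let genres : PySem.Set String := PySem.Set.ofList (pvSplitBar (pvLookup movie "Genre"))
      let actors := pvSplitBar (pvLookup movie "Actors")
      actors.foldl (fun ag actor0 =>
        let actor := PySem.Str.strip actor0
        let ag1 := if ag.contains actor then ag else ag.insert actor PySem.Set.empty
        ag1.modify actor PySem.Set.empty (fun s => PySem.Set.update s genres)) ag)
      PySem.Dict.empty
    = data.foldl (fun ag movie =>
      let genres : PySem.Set String := PySem.Set.ofList (pvSplitBar (pvLookup movie "Genre"))
      (pvSplitBar (pvLookup movie "Actors")).foldl (fun ag actor0 =>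
        let actor := PySem.Str.strip actor0
        ag.insert actor (PySem.Set.union (ag.getD actor PySem.Set.empty) genres)) ag)
      PySem.Dict.empty := by
  congr 1
  funext ag movie
  dsimp only
  congr 1
  funext ag a0
  exact step_eq ag _ _

-- Set facts: contains is membership; updating by a deduped list is updating by the raw list.
lemma set_contains_iff {α : Type} [BEq α] [LawfulBEq α] (s : PySem.Set α) (x : α) :
    PySem.Set.contains s x = true ↔ x ∈ s := by
  simp [PySem.Set.contains]

lemma mem_update {α : Type} [BEq α] [LawfulBEq α] (s : PySem.Set α) (l : List α) (y : α) :
    y ∈ PySem.Set.update s l ↔ y ∈ s ∨ y ∈ l := by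
  induction l generalizing s with
  | nil => simp [PySem.Set.update]
  | cons x l ih =>
    show y ∈ PySem.Set.update (s.add x) l ↔ _
    rw [ih, PySem.Set.mem_add]
    simp
    tauto

lemma update_add {α : Type} [BEq α] [LawfulBEq α] (s t : PySem.Set α) (x : α) :
    PySem.Set.update s (PySem.Set.add t x) = PySem.Set.add (PySem.Set.update s t) x := by
  by_cases hx : t.contains x = true
  · rw [show PySem.Set.add t x = t from by simp only [PySem.Set.add, hx, if_true]]
    have hx' : x ∈ t := (set_contains_iff t x).mp hx
    have hct : (PySem.Set.update s t).contains x = true :=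
      (set_contains_iff _ x).mpr ((mem_update s t x).mpr (Or.inr hx'))
    simp only [PySem.Set.add, hct, if_true]
  · have hx0 : t.contains x = false := by
      rw [← Bool.not_eq_true]; exact hx
    rw [show PySem.Set.add t x = t ++ [x] from by
      simp only [PySem.Set.add, hx0, Bool.false_eq_true, if_false]]
    show List.foldl _ s (t ++ [x]) = _
    rw [List.foldl_append]
    rfl

lemma update_update {α : Type} [BEq α] [LawfulBEq α] (s t : PySem.Set α) (l : List α) :
    PySem.Set.update s (PySem.Set.update t l) = PySem.Set.update (PySem.Set.update s t) l := by
  induction l generalizing s t with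
  | nil => rfl
  | cons x l ih =>
    show PySem.Set.update s (PySem.Set.update (t.add x) l)
        = PySem.Set.update (PySem.Set.update s t) (x :: l)
    rw [ih]
    show PySem.Set.update (PySem.Set.update s (t.add x)) l
        = PySem.Set.update (PySem.Set.add (PySem.Set.update s t) x) l
    rw [update_add]

lemma update_ofList {α : Type} [BEq α] [LawfulBEq α] (s : PySem.Set α) (l : List α) :
    PySem.Set.update s (PySem.Set.ofList l) = PySem.Set.update s l := by
  have h : PySem.Set.ofList l = PySem.Set.update ([] : PySem.Set α) l := by
    rw [PySem.Set.ofList_eq_foldl]; rfl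
  rw [h, update_update]
  rfl

lemma len_add_of_not_mem {α : Type} [BEq α] [LawfulBEq α] (s : PySem.Set α) (x : α) (h : x ∉ s) :
    PySem.Set.len (PySem.Set.add s x) = PySem.Set.len s + 1 := by
  have hc : s.contains x = false := by
    rw [← Bool.not_eq_true]
    intro hcc
    exact h ((set_contains_iff s x).mp hcc)
  simp only [PySem.Set.add, hc, Bool.false_eq_true, if_false, PySem.Set.len, List.length_append,
    List.length_cons, List.length_nil]
  push_cast
  ring

lemma add_of_mem {α : Type} [BEq α] [LawfulBEq α] (s : PySem.Set α) (x : α) (h : x ∈ s) :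
    PySem.Set.add s x = s := by
  simp only [PySem.Set.add, (set_contains_iff s x).mpr h, if_true]

-- inserting a key's current value back is the identity
lemma insert_getD_self {κ ν : Type} [BEq κ] [LawfulBEq κ] (d : PySem.Dict κ ν) (a : κ) (d0 : ν)
    (h : d.contains a = true) (hnd : d.keys.Nodup) : d.insert a (d.getD a d0) = d := by
  apply PySem.Dict.ext
  rw [PySem.Dict.items_insert_of_contains d _ h]
  conv_rhs => rw [← List.map_id d.items]
  apply List.map_congr_left
  intro p hp
  by_cases hpa : (p.1 == a) = true
  · have hpa' : p.1 = a := by simpa using hpa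
    have hv : d.getD p.1 d0 = p.2 := PySem.Dict.getD_of_mem_items d (by simpa using hp) hnd d0
    simp only [hpa, if_true, id]
    rw [← hpa', hv]
  · simp [hpa]

-- the invariant tying A's dict of genre sets to B's (counts, seen-pairs) state
def InvPV (ag : PySem.Dict String (PySem.Set String)) (counts : PySem.Dict String Int)
    (seen : PySem.Set (String × String)) : Prop :=
  ag.keys.Nodup ∧ counts.keys.Nodup ∧
  counts.items = ag.items.map (fun p => (p.1, PySem.Set.len p.2)) ∧
  ∀ x : String × String, (x ∈ seen) ↔ ∃ s, ag.get? x.1 = some s ∧ x.2 ∈ s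

-- B's inner genre loop: bumps a's count to the size of the updated set, grows seen at key a only
lemma genre_fold (a : String) (genres : List String) :
    ∀ (s : PySem.Set String) (counts : PySem.Dict String Int) (seen : PySem.Set (String × String)),
    counts.contains a = true → counts.keys.Nodup →
    counts.getD a 0 = PySem.Set.len s →
    (∀ g : String, ((a, g) ∈ seen) ↔ g ∈ s) →
    ∃ seen' : PySem.Set (String × String),
      genres.foldl (fun st g => if st.2.contains (a, g) then st
          else (st.1.modify a 0 (· + 1), st.2.add (a, g))) (counts, seen)
        = (counts.insert a (PySem.Set.len (PySem.Set.update s genres)), seen')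
      ∧ (∀ g : String, ((a, g) ∈ seen') ↔ g ∈ PySem.Set.update s genres)
      ∧ (∀ x : String × String, x.1 ≠ a → ((x ∈ seen') ↔ x ∈ seen)) := by
  induction genres with
  | nil =>
    intro s counts seen hca hnd hD hS
    refine ⟨seen, ?_, hS, fun x _ => Iff.rfl⟩
    show (counts, seen) = (counts.insert a (PySem.Set.len s), seen)
    rw [← hD, insert_getD_self counts a 0 hca hnd]
  | cons g rest ih =>
    intro s counts seen hca hnd hD hS
    rw [List.foldl_cons]
    by_cases hm : g ∈ s
    · have hc : seen.contains (a, g) = true := (set_contains_iff _ _).mpr ((hS g).mpr hm)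
      simp only [hc, if_true]
      have hupd : PySem.Set.update s (g :: rest) = PySem.Set.update s rest := by
        show PySem.Set.update (s.add g) rest = _
        rw [add_of_mem s g hm]
      obtain ⟨seen', h1, h2, h3⟩ := ih s counts seen hca hnd hD hS
      refine ⟨seen', ?_, ?_, h3⟩
      · rw [hupd]; exact h1
      · intro g'; rw [hupd]; exact h2 g'
    · have hnm : (a, g) ∉ seen := fun hmem => hm ((hS g).mp hmem)
      have hc : seen.contains (a, g) = false := by
        rw [← Bool.not_eq_true]
        intro hcc
        exact hnm ((set_contains_iff _ _).mp hcc)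
      simp only [hc, Bool.false_eq_true, if_false]
      have hmod : counts.modify a 0 (· + 1) = counts.insert a (PySem.Set.len (s.add g)) := by
        show counts.insert a (counts.getD a 0 + 1) = _
        rw [hD, len_add_of_not_mem s g hm]
      rw [hmod]
      have hS' : ∀ g' : String, ((a, g') ∈ seen.add (a, g)) ↔ g' ∈ s.add g := by
        intro g'
        rw [PySem.Set.mem_add, PySem.Set.mem_add, hS g']
        constructor
        · rintro (h | h)
          · exact Or.inl h
          · exact Or.inr (by cases h; rfl)
        · rintro (h | h)
          · exact Or.inl h
          · exact Or.inr (by rw [h])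
      obtain ⟨seen', h1, h2, h3⟩ := ih (s.add g) (counts.insert a (PySem.Set.len (s.add g))) (seen.add (a, g))
        (PySem.Dict.contains_insert_self _ _ _) (PySem.Dict.nodup_keys_insert _ _ _ hnd)
        (PySem.Dict.getD_insert_self _ _ _ _) hS'
      refine ⟨seen', ?_, ?_, ?_⟩
      · rw [h1, PySem.Dict.insert_insert_self]
        rfl
      · exact h2
      · intro x hx
        rw [h3 x hx, PySem.Set.mem_add]
        constructor
        · rintro (h | h)
          · exact h
          · exact absurd (congrArg Prod.fst h) hx
        · exact Or.inl

-- one actor of one movie preserves the invariant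
lemma actor_step (genres : List String) (a : String)
    (ag : PySem.Dict String (PySem.Set String)) (counts : PySem.Dict String Int)
    (seen : PySem.Set (String × String)) (hInv : InvPV ag counts seen) :
    ∃ counts' seen',
      genres.foldl (fun st g => if st.2.contains (a, g) then st
          else (st.1.modify a 0 (· + 1), st.2.add (a, g))) (counts.setdefault a 0, seen)
        = (counts', seen')
      ∧ InvPV (ag.insert a (PySem.Set.union (ag.getD a PySem.Set.empty) (PySem.Set.ofList genres))) counts' seen' := by
  obtain ⟨hagnd, hcnd, hitems, hseen⟩ := hInv
  have hkeys : counts.keys = ag.keys := by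
    show counts.items.map Prod.fst = ag.items.map Prod.fst
    rw [hitems, List.map_map]
    rfl
  have hcont : counts.contains a = ag.contains a := by
    rw [Bool.eq_iff_iff, PySem.Dict.contains_iff_mem_keys, PySem.Dict.contains_iff_mem_keys, hkeys]
  by_cases hca : ag.contains a = true
  · have hcca : counts.contains a = true := by rw [hcont]; exact hca
    rw [PySem.Dict.setdefault_of_contains counts 0 hcca]
    obtain ⟨s, hs⟩ : ∃ s, ag.get? a = some s := by
      cases hq : ag.get? a with
      | none => exact absurd ((PySem.Dict.get?_eq_none_iff_contains ag a).mp hq) (by simp [hca])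
      | some s => exact ⟨s, rfl⟩
    have hgd : ag.getD a PySem.Set.empty = s := by
      rw [PySem.Dict.getD_eq_get?_getD, hs]
      rfl
    have hu : PySem.Set.union (ag.getD a PySem.Set.empty) (PySem.Set.ofList genres)
        = PySem.Set.update s genres := by
      rw [hgd]
      show PySem.Set.update s (PySem.Set.ofList genres) = _
      exact update_ofList s genres
    rw [hu]
    have hmem_items : (a, s) ∈ ag.items := PySem.Dict.mem_items_of_get?_eq_some ag hs
    have hcD : counts.getD a 0 = PySem.Set.len s := by
      have hmc : (a, PySem.Set.len s) ∈ counts.items := by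
        rw [hitems]
        exact List.mem_map.mpr ⟨(a, s), hmem_items, rfl⟩
      exact PySem.Dict.getD_of_mem_items counts hmc hcnd 0
    have hSa : ∀ g : String, ((a, g) ∈ seen) ↔ g ∈ s := by
      intro g
      rw [hseen (a, g)]
      constructor
      · rintro ⟨s', hs', hg⟩
        rw [hs] at hs'
        cases hs'
        exact hg
      · exact fun hg => ⟨s, hs, hg⟩
    obtain ⟨seen', h1, h2, h3⟩ := genre_fold a genres s counts seen hcca hcnd hcD hSa
    refine ⟨_, seen', h1, PySem.Dict.nodup_keys_insert _ _ _ hagnd,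
      PySem.Dict.nodup_keys_insert _ _ _ hcnd, ?_, ?_⟩
    · rw [PySem.Dict.items_insert_of_contains counts _ hcca,
        PySem.Dict.items_insert_of_contains ag _ hca, hitems, List.map_map, List.map_map]
      apply List.map_congr_left
      intro p _
      by_cases hpa : (p.1 == a) = true
      · simp [Function.comp, hpa]
      · simp [Function.comp, hpa]
    · intro x
      by_cases hx : x.1 = a
      · obtain ⟨x1, x2⟩ := x
        simp only at hx
        subst hx
        rw [h2 x2]
        constructor
        · exact fun hg => ⟨_, PySem.Dict.get?_insert_self _ _ _, hg⟩
        · rintro ⟨s', hs', hg⟩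
          rw [PySem.Dict.get?_insert_self] at hs'
          cases hs'
          exact hg
      · rw [h3 x hx, hseen x, PySem.Dict.get?_insert_of_ne _ _ hx]
  · have hca0 : ag.contains a = false := by rw [← Bool.not_eq_true]; exact hca
    have hcca : counts.contains a = false := by rw [hcont]; exact hca0
    rw [PySem.Dict.setdefault_of_not_contains counts 0 hcca]
    have hgd : ag.getD a PySem.Set.empty = PySem.Set.empty :=
      PySem.Dict.getD_of_not_contains ag _ hca0
    have hu : PySem.Set.union (ag.getD a PySem.Set.empty) (PySem.Set.ofList genres)
        = PySem.Set.update PySem.Set.empty genres := by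
      rw [hgd]
      show PySem.Set.update PySem.Set.empty (PySem.Set.ofList genres) = _
      exact update_ofList _ genres
    rw [hu]
    have hq : ag.get? a = none := (PySem.Dict.get?_eq_none_iff_contains ag a).mpr hca0
    have hSa : ∀ g : String, ((a, g) ∈ seen) ↔ g ∈ (PySem.Set.empty : PySem.Set String) := by
      intro g
      constructor
      · intro hmem
        obtain ⟨s', hs', _⟩ := (hseen (a, g)).mp hmem
        rw [hq] at hs'
        cases hs'
      · intro hg
        cases hg
    obtain ⟨seen', h1, h2, h3⟩ := genre_fold a genres PySem.Set.empty (counts.insert a 0) seen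
      (PySem.Dict.contains_insert_self _ _ _) (PySem.Dict.nodup_keys_insert _ _ _ hcnd)
      (PySem.Dict.getD_insert_self _ _ _ _) hSa
    rw [PySem.Dict.insert_insert_self] at h1
    refine ⟨_, seen', h1, PySem.Dict.nodup_keys_insert _ _ _ hagnd,
      PySem.Dict.nodup_keys_insert _ _ _ hcnd, ?_, ?_⟩
    · rw [PySem.Dict.items_insert_of_not_contains counts _ hcca,
        PySem.Dict.items_insert_of_not_contains ag _ hca0, hitems, List.map_append]
      rfl
    · intro x
      by_cases hx : x.1 = a
      · obtain ⟨x1, x2⟩ := x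
        simp only at hx
        subst hx
        rw [h2 x2]
        constructor
        · exact fun hg => ⟨_, PySem.Dict.get?_insert_self _ _ _, hg⟩
        · rintro ⟨s', hs', hg⟩
          rw [PySem.Dict.get?_insert_self] at hs'
          cases hs'
          exact hg
      · rw [h3 x hx, hseen x, PySem.Dict.get?_insert_of_ne _ _ hx]

-- one movie preserves the invariant
lemma movie_fold (genres : List String) (actors : List String) :
    ∀ ag counts seen, InvPV ag counts seen →
    ∃ counts' seen',
      actors.foldl (fun st actor0 =>
        let actor := PySem.Str.strip actor0
        genres.foldl (fun st g => if st.2.contains (actor, g) then st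
            else (st.1.modify actor 0 (· + 1), st.2.add (actor, g)))
          (st.1.setdefault actor 0, st.2)) (counts, seen)
        = (counts', seen')
      ∧ InvPV (actors.foldl (fun ag actor0 =>
          let actor := PySem.Str.strip actor0
          ag.insert actor (PySem.Set.union (ag.getD actor PySem.Set.empty) (PySem.Set.ofList genres))) ag)
          counts' seen' := by
  induction actors with
  | nil => exact fun ag counts seen h => ⟨counts, seen, rfl, h⟩
  | cons a0 actors ih =>
    intro ag counts seen hInv
    rw [List.foldl_cons, List.foldl_cons]
    obtain ⟨c1, s1, hstep, hInv1⟩ := actor_step genres (PySem.Str.strip a0) ag counts seen hInv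
    obtain ⟨c', s', h1, h2⟩ := ih _ c1 s1 hInv1
    refine ⟨c', s', ?_, h2⟩
    rw [← hstep] at h1
    exact h1

-- whole aggregation: B's counts dict is A's dict mapped through Set.len
lemma agg_rel (data : List (List (String × String))) :
    ∀ ag counts seen, InvPV ag counts seen →
    ∃ counts' seen',
      data.foldl (fun st movie =>
        let genres := pvSplitBar (pvLookup movie "Genre")
        (pvSplitBar (pvLookup movie "Actors")).foldl (fun st actor0 =>
          let actor := PySem.Str.strip actor0
          genres.foldl (fun st g => if st.2.contains (actor, g) then st
              else (st.1.modify actor 0 (· + 1), st.2.add (actor, g)))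
            (st.1.setdefault actor 0, st.2)) st) (counts, seen)
        = (counts', seen')
      ∧ InvPV (data.foldl (fun ag movie =>
          let genres : PySem.Set String := PySem.Set.ofList (pvSplitBar (pvLookup movie "Genre"))
          (pvSplitBar (pvLookup movie "Actors")).foldl (fun ag actor0 =>
            let actor := PySem.Str.strip actor0
            ag.insert actor (PySem.Set.union (ag.getD actor PySem.Set.empty) genres)) ag) ag)
          counts' seen' := by
  induction data with
  | nil => exact fun ag counts seen h => ⟨counts, seen, rfl, h⟩
  | cons movie data ih =>
    intro ag counts seen hInv
    rw [List.foldl_cons, List.foldl_cons]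
    obtain ⟨c1, s1, hstep, hInv1⟩ := movie_fold (pvSplitBar (pvLookup movie "Genre"))
      (pvSplitBar (pvLookup movie "Actors")) ag counts seen hInv
    obtain ⟨c', s', h1, h2⟩ := ih _ c1 s1 hInv1
    refine ⟨c', s', ?_, h2⟩
    rw [← hstep] at h1
    exact h1

lemma insertBy_append (bef : (String × Int) → (String × Int) → Bool) (x : String × Int)
    (L T : List (String × Int)) (h : ∀ z ∈ L, bef x z = false) :
    PySem.List.insertBy bef x (L ++ T) = L ++ PySem.List.insertBy bef x T := by
  induction L with
  | nil => simp
  | cons a L ih =>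
    have ha := h a (by simp)
    show PySem.List.insertBy bef x (a :: (L ++ T)) = a :: (L ++ PySem.List.insertBy bef x T)
    cases hLT : L ++ T with
    | nil =>
      rcases List.append_eq_nil_iff.mp hLT with ⟨h1, h2⟩
      subst h1; subst h2
      simp [PySem.List.insertBy, ha]
    | cons b T' =>
      rw [← hLT]
      have : PySem.List.insertBy bef x (a :: (L ++ T)) = a :: PySem.List.insertBy bef x (L ++ T) := by
        rw [hLT]; simp [PySem.List.insertBy, ha]
      rw [this, ih (fun z hz => h z (List.mem_cons_of_mem _ hz))]

lemma insertBy_front (bef : (String × Int) → (String × Int) → Bool) (x : String × Int)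
    (T : List (String × Int)) (h : ∀ z ∈ T, bef x z = true) :
    PySem.List.insertBy bef x T = x :: T := by
  cases T with
  | nil => rfl
  | cons b T' => simp [PySem.List.insertBy, h b (by simp)]

lemma insert_into_groups (ks : List Int) (G : Int → List (String × Int)) (y : String × Int)
    (hG : ∀ c, ∀ z ∈ G c, z.2 = c) (hks : ks.Pairwise (· > ·)) (hy : y.2 ∈ ks) :
    PySem.List.insertBy (fun a b => decide (b.2 < a.2)) y (ks.flatMap G)
      = ks.flatMap (fun c => G c ++ if y.2 == c then [y] else []) := by
  induction ks with
  | nil => simp at hy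
  | cons k t ih =>
    have hkt : ∀ c ∈ t, k > c := fun c hc => List.rel_of_pairwise_cons hks hc
    have htp : t.Pairwise (· > ·) := List.Pairwise.of_cons hks
    rw [List.flatMap_cons, List.flatMap_cons]
    by_cases hyk : y.2 = k
    · rw [insertBy_append _ _ _ _ (fun z hz => by simp [hG k z hz, hyk])]
      rw [insertBy_front _ _ _ (fun z hz => by
        rcases List.mem_flatMap.mp hz with ⟨c, hc, hzc⟩
        simp [hG c z hzc, hyk ▸ hkt c hc])]
      have ht : t.flatMap (fun c => G c ++ if y.2 == c then [y] else []) = t.flatMap G := by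
        apply List.flatMap_congr
        intro c hc
        have : y.2 ≠ c := by have := hkt c hc; omega
        simp [this]
      rw [ht]
      simp [hyk]
    · have hyt : y.2 ∈ t := by
        rcases List.mem_cons.mp hy with h | h
        · exact absurd h hyk
        · exact h
      rw [insertBy_append _ _ _ _ (fun z hz => by
        have hz2 := hG k z hz
        have : k > y.2 := hkt _ hyt
        simp [hz2]; omega)]
      rw [ih htp hyt]
      have : (y.2 == k) = false := by simp [hyk]
      simp [this]

lemma stable_sort_groups (ks : List Int) (hks : ks.Pairwise (· > ·)) :
    ∀ (xs : List (String × Int)), (∀ p ∈ xs, p.2 ∈ ks) →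
    PySem.List.sorted xs (fun p => p.2) true = ks.flatMap (fun c => xs.filter (fun p => p.2 == c)) := by
  intro xs
  induction xs using List.reverseRecOn with
  | nil =>
    intro _
    rw [PySem.List.sorted_rev_eq_foldl_insertBy]
    simp [List.flatMap_eq_nil_iff]
  | append_singleton xs y ih =>
    intro h
    rw [PySem.List.sorted_rev_eq_foldl_insertBy, List.foldl_append, List.foldl_cons, List.foldl_nil,
      ← PySem.List.sorted_rev_eq_foldl_insertBy,
      ih (fun p hp => h p (List.mem_append_left _ hp)),
      insert_into_groups ks _ y (fun c z hz => by simpa using (List.mem_filter.mp hz).2)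
        hks (h y (by simp))]
    apply List.flatMap_congr
    intro c hc
    rw [List.filter_append]
    by_cases hyc : y.2 = c
    · simp [List.filter, hyc]
    · have : (y.2 == c) = false := by
        simp [hyc]
      simp [List.filter, this]

-- selection phase, over an arbitrary (actor, count) list
lemma phase2 (cnts : List (String × Int)) :
    (let top_2 : List Int :=
       PySem.List.slice (PySem.List.sorted (PySem.Set.ofList (cnts.map (fun p => p.2))) (fun x => x) true) none (some 2)
     PySem.List.sorted (cnts.filter (fun p => top_2.contains p.2)) (fun p => p.2) true)
    = (if cnts.isEmpty then [] else
       let m1 : Int := (PySem.List.max? (cnts.map (fun p => p.2)) (fun x => x)).getD 0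
       let lows := (cnts.map (fun p => p.2)).filter (fun c => c < m1)
       let out := cnts.filter (fun p => p.2 == m1)
       if lows.isEmpty then out
       else out ++ cnts.filter (fun p => p.2 == (PySem.List.max? lows (fun x => x)).getD 0)) := by
  by_cases hnil : cnts = []
  · subst hnil
    rfl
  · have hvne : cnts.map (fun p => p.2) ≠ [] := by simpa using hnil
    obtain ⟨m1, hm1⟩ : ∃ m, PySem.List.max? (cnts.map (fun p => p.2)) (fun x => x) = some m := by
      cases hq : PySem.List.max? (cnts.map (fun p => p.2)) (fun x => x) with
      | none => exact absurd ((PySem.List.max?_eq_none_iff _ _).mp hq) hvne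
      | some m => exact ⟨m, rfl⟩
    have hm1mem : m1 ∈ cnts.map (fun p => p.2) := PySem.List.max?_mem hm1
    have hm1max : ∀ y ∈ cnts.map (fun p => p.2), y ≤ m1 := PySem.List.max?_isMax hm1
    dsimp only
    rw [if_neg (by simpa [List.isEmpty_iff] using hnil)]
    rw [show (PySem.List.max? (cnts.map (fun p => p.2)) (fun x => x)).getD 0 = m1 from by
      rw [hm1]
      rfl]
    set L := PySem.List.sorted (PySem.Set.ofList (cnts.map (fun p => p.2))) (fun x : Int => x) true with hLdef
    have hLperm := PySem.List.sorted_perm (PySem.Set.ofList (cnts.map (fun p => p.2))) (fun x : Int => x) true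
    have hLnd : L.Nodup := (hLperm.nodup_iff).mpr (PySem.Set.nodup_ofList _)
    have hLpair : L.Pairwise (· > ·) := by
      have hp := PySem.List.sorted_pairwise_rev (PySem.Set.ofList (cnts.map (fun p => p.2))) (fun x : Int => x)
      exact ((hp.and hLnd).imp (fun {a b} h => h.1.lt_of_ne (Ne.symm h.2)))
    have hLmem : ∀ x : Int, x ∈ L ↔ x ∈ cnts.map (fun p => p.2) := by
      intro x
      rw [hLdef, PySem.List.mem_sorted, PySem.Set.mem_ofList]
    obtain ⟨l0, t, hL⟩ : ∃ l0 t, L = l0 :: t := by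
      cases hq : L with
      | nil =>
        have hmm := (hLmem m1).mpr hm1mem
        rw [hq] at hmm
        cases hmm
      | cons a b => exact ⟨a, b, rfl⟩
    have hl0 : l0 = m1 := by
      have h1 : l0 ≤ m1 := hm1max l0 ((hLmem l0).mp (hL ▸ List.mem_cons_self))
      have h2 : m1 ≤ l0 :=
        PySem.List.key_head_sorted_rev_ge _ _ (hLdef.symm.trans hL) m1
          ((PySem.Set.mem_ofList _ m1).mpr hm1mem)
      omega
    rw [hl0] at hL
    have hheadgt : ∀ y ∈ t, m1 > y := fun y hy => List.rel_of_pairwise_cons (hL ▸ hLpair) hy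
    by_cases hlow : (cnts.map (fun p => p.2)).filter (fun c => decide (c < m1)) = []
    · rw [show ((cnts.map (fun p => p.2)).filter (fun c => decide (c < m1))).isEmpty = true from List.isEmpty_iff.mpr hlow, if_pos rfl]
      have ht : t = [] := by
        cases htt : t with
        | nil => rfl
        | cons t0 t' =>
          have ht0L : t0 ∈ L := by
            rw [hL, htt]
            simp
          have ht0v : t0 ∈ cnts.map (fun p => p.2) := (hLmem t0).mp ht0L
          have ht0lt : t0 < m1 := hheadgt t0 (htt ▸ List.mem_cons_self)
          have hmem : t0 ∈ (cnts.map (fun p => p.2)).filter (fun c => decide (c < m1)) :=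
            List.mem_filter.mpr ⟨ht0v, by simpa using ht0lt⟩
          rw [hlow] at hmem
          cases hmem
      rw [hL, ht, PySem.List.slice_to _ (by norm_num)]
      have hans : cnts.filter (fun p => ([m1] : List Int).take (2 : Int).toNat |>.contains p.2)
          = cnts.filter (fun p => p.2 == m1) := by
        apply List.filter_congr
        intro p _
        show (([m1] : List Int).take (2 : Int).toNat).contains p.2 = (p.2 == m1)
        show (([m1] : List Int)).contains p.2 = (p.2 == m1)
        rw [List.contains_cons]
        simp
      rw [hans]
      apply PySem.List.sorted_rev_eq_self_of_pairwise
      apply List.pairwise_of_forall_mem_list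
      intro p hp q hq
      have hp2 : p.2 = m1 := by simpa using (List.mem_filter.mp hp).2
      have hq2 : q.2 = m1 := by simpa using (List.mem_filter.mp hq).2
      rw [hp2, hq2]
    · rw [show ((cnts.map (fun p => p.2)).filter (fun c => decide (c < m1))).isEmpty = false from by
        simpa [List.isEmpty_iff] using hlow]
      rw [if_neg (by simp)]
      obtain ⟨m2, hm2⟩ : ∃ m, PySem.List.max? ((cnts.map (fun p => p.2)).filter (fun c => decide (c < m1))) (fun x => x) = some m := by
        cases hq : PySem.List.max? ((cnts.map (fun p => p.2)).filter (fun c => decide (c < m1))) (fun x => x) with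
        | none => exact absurd ((PySem.List.max?_eq_none_iff _ _).mp hq) hlow
        | some m => exact ⟨m, rfl⟩
      rw [show (PySem.List.max? ((cnts.map (fun p => p.2)).filter (fun c => decide (c < m1))) (fun x => x)).getD 0 = m2 from by
        rw [hm2]
        rfl]
      have hm2f := List.mem_filter.mp (PySem.List.max?_mem hm2)
      have hm2v : m2 ∈ cnts.map (fun p => p.2) := hm2f.1
      have hm2lt : m2 < m1 := by simpa using hm2f.2
      have hm2max : ∀ y ∈ cnts.map (fun p => p.2), y < m1 → y ≤ m2 := fun y hy hylt =>
        PySem.List.max?_isMax hm2 y (List.mem_filter.mpr ⟨hy, by simpa using hylt⟩)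
      have hm2t : m2 ∈ t := by
        have : m2 ∈ L := (hLmem m2).mpr hm2v
        rw [hL] at this
        rcases List.mem_cons.mp this with h | h
        · omega
        · exact h
      obtain ⟨t0, t', htt⟩ : ∃ t0 t', t = t0 :: t' := by
        cases hq : t with
        | nil =>
          rw [hq] at hm2t
          cases hm2t
        | cons a b => exact ⟨a, b, rfl⟩
      have ht0 : t0 = m2 := by
        have ht0L : t0 ∈ L := by
          rw [hL, htt]
          simp
        have ht0v : t0 ∈ cnts.map (fun p => p.2) := (hLmem t0).mp ht0L
        have ht0lt : t0 < m1 := hheadgt t0 (htt ▸ List.mem_cons_self)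
        have h1 : t0 ≤ m2 := hm2max t0 ht0v ht0lt
        rw [htt] at hm2t
        rcases List.mem_cons.mp hm2t with h | h
        · omega
        · have hpt : t.Pairwise (· > ·) := (hL ▸ hLpair).of_cons
          have := List.rel_of_pairwise_cons (htt ▸ hpt) h
          omega
      rw [ht0] at htt
      rw [hL, htt, PySem.List.slice_to _ (by norm_num)]
      have htake : ((m1 :: m2 :: t').take (2 : Int).toNat) = [m1, m2] := rfl
      rw [htake]
      have hks : ([m1, m2] : List Int).Pairwise (· > ·) := by
        simp [hm2lt]
      have hmem' : ∀ p ∈ cnts.filter (fun p => ([m1, m2] : List Int).contains p.2), p.2 ∈ ([m1, m2] : List Int) := by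
        intro p hp
        exact List.contains_iff_mem.mp (List.mem_filter.mp hp).2
      rw [stable_sort_groups [m1, m2] hks _ hmem']
      rw [List.flatMap_cons, List.flatMap_cons, List.flatMap_nil, List.append_nil]
      have hfil : ∀ c : Int, c ∈ ([m1, m2] : List Int) →
          (cnts.filter (fun p => ([m1, m2] : List Int).contains p.2)).filter (fun p => p.2 == c)
            = cnts.filter (fun p => p.2 == c) := by
        intro c hc
        rw [List.filter_filter]
        apply List.filter_congr
        intro p _
        by_cases hpc : p.2 = c
        · simp [hpc, hc]
        · have hf : (p.2 == c) = false := by simp [hpc]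
          simp [hf]
      rw [hfil m1 (by simp), hfil m2 (by simp)]

-- ===== VERDICT (by name: the statement is the Claim_ definition above) =====
theorem top_2_actors_playing_most_genres_movies_spec : Claim_equal_top_2_actors_playing_most_genres_movies := by
  intro data _ _
  unfold Spec_top_2_actors_playing_most_genres_movies
  unfold top_2_actors_playing_most_genres_movies top_2_actors_playing_most_genres_movies_alt
  rw [agg_eq]
  have hInv0 : InvPV PySem.Dict.empty PySem.Dict.empty PySem.Set.empty := by
    refine ⟨?_, ?_, rfl, ?_⟩
    · exact List.nodup_nil
    · exact List.nodup_nil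
    · intro x
      constructor
      · intro hx
        cases hx
      · rintro ⟨s, hs, _⟩
        rw [PySem.Dict.get?_empty] at hs
        cases hs
  obtain ⟨counts', seen', hB, hInv⟩ := agg_rel data PySem.Dict.empty PySem.Dict.empty PySem.Set.empty hInv0
  rw [hB]
  obtain ⟨_, _, hitems, _⟩ := hInv
  dsimp only
  rw [← hitems]
  exact phase2 counts'.items
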